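-- pv_equiv track=rewrite | github.com/qsyPython/ArithmeticNice | qsy/arithmetic/21_multinomial_array.py | delete_sort_array
-- ===== SOURCE A (Python) =====
-- def delete_sort_array(origin_list):
--     if len(origin_list) == 0:
--         return 0
--     elif len(origin_list) == 1:
--         return 1
--     else:
--         for index,item in enumerate(origin_list[:]):
--             if index+1 < len(origin_list):
--                 if origin_list[index] == origin_list[index+1]:
--                     origin_list.pop(index)
--         return len(origin_list)
-- ===== SOURCE B (Python) =====
-- def delete_sort_array(origin_list):
--     # A's scan always enters each run of equal values at its first element,
--     # so the number of pops is the sum of len(run)//2 over maximal runs.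
--     # One value-iteration pass accumulating run lengths; no indexing, no mutation.
--     if not origin_list:
--         return 0
--     pops = 0
--     prev = origin_list[0]
--     runlen = 1
--     for x in origin_list[1:]:
--         if x == prev:
--             runlen += 1
--         else:
--             pops += runlen // 2
--             prev = x
--             runlen = 1
--     pops += runlen // 2
--     return len(origin_list) - pops
-- ===== Notes on version B (the rewrite author's own statement) =====
-- stated objective: faster
-- what changed: Replaces the mutating pop-scan (enumerate + repeated indexing + list.pop) by a single non-mutating run-length pass: A's pop count equals the sum of floor(runlen/2) over maximal runs of equal values, so B accumulates run lengths and returns n minus that sum.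
import Mathlib
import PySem

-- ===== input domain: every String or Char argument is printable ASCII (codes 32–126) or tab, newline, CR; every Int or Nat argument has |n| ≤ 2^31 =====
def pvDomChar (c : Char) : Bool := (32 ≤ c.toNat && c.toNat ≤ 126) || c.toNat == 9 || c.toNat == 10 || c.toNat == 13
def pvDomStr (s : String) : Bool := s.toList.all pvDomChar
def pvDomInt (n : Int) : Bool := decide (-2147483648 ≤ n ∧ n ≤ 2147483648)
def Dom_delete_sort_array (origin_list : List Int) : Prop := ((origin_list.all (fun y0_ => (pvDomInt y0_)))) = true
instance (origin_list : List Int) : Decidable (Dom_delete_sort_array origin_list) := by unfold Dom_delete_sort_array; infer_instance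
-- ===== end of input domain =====

-- B replaces A's mutating pop-scan by a non-mutating counting pass (faster, O(n) vs O(n^2)).
-- A mutates its argument in place (pops elements); the equivalence proved here is about the RETURN value only; B does not mutate.

-- ===== PORT A =====
-- the loop body: if index+1 < len(L): if L[index] == L[index+1]: L.pop(index)
def pvStepA (L : List Int) (index : Int) : List Int :=
  if index + 1 < (L.length : Int) then
    if PySem.List.pyGet? L index = PySem.List.pyGet? L (index + 1) then
      match PySem.List.pop? L index with
      | some r => r.2
      | none => L   -- unreachable: index is in range here (totality guard)
    else L
  else L

def delete_sort_array (origin_list : List Int) : Int :=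
  if origin_list.length == 0 then 0
  else if origin_list.length == 1 then 1
  else
    -- for index, item in enumerate(origin_list[:]): …  (item unused)
    let final := (PySem.List.enumerate origin_list 0).foldl (fun L p => pvStepA L p.1) origin_list
    (final.length : Int)

-- ===== PORT B =====
-- the run-length pass: state (pops, prev, runlen); pops += runlen // 2 at each run end
def pvStepB (st : Int × Int × Int) (x : Int) : Int × Int × Int :=
  if x = st.2.1 then (st.1, st.2.1, st.2.2 + 1)
  else (st.1 + PySem.Int.floordiv st.2.2 2, x, 1)

def delete_sort_array_alt (origin_list : List Int) : Int :=
  match origin_list with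
  | [] => 0
  | h :: t =>
    let st := t.foldl pvStepB (0, h, 1)
    (origin_list.length : Int) - (st.1 + PySem.Int.floordiv st.2.2 2)

-- ===== PRECONDITION & SPEC =====
def Spec_delete_sort_array (origin_list : List Int) (out : Int) : Prop := out = delete_sort_array_alt origin_list
instance (origin_list : List Int) (out : Int) : Decidable (Spec_delete_sort_array origin_list out) := by unfold Spec_delete_sort_array; infer_instance

-- ===== CLAIM (what is proved, stated in full; the proofs are below) =====
def Claim_equal_delete_sort_array : Prop := ∀ (origin_list : List Int), Dom_delete_sort_array origin_list → Spec_delete_sort_array origin_list (delete_sort_array origin_list)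

-- ===== LEMMAS AND PROOFS =====

-- bridge quantity: the pop count of A's scan, as a jump-2 recursion
def pvCountPops : List Int → Int
  | a :: b :: rest => if a = b then 1 + pvCountPops rest else pvCountPops (b :: rest)
  | _ => 0

-- the list A's loop leaves behind, as a pure recursion on the unscanned suffix
def pvKeep : List Int → List Int
  | a :: b :: rest => if a = b then b :: pvKeep rest else a :: pvKeep (b :: rest)
  | l => l

lemma pvKeep_length (l : List Int) :
    ((pvKeep l).length : Int) = (l.length : Int) - pvCountPops l := by
  fun_induction pvKeep l with
  | case1 a rest ih => simp [pvCountPops, ih]; omega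
  | case2 a b rest hab ih =>
      simp [pvCountPops, hab, ih]; push_cast [pvCountPops, hab] at ih ⊢; omega
  | case3 l h => cases l with
    | nil => simp [pvCountPops]
    | cons a t => cases t with
      | nil => simp [pvCountPops]
      | cons b r => exact absurd rfl (h a b r)

lemma pvStepA_noop (L : List Int) (i : Int) (h : (L.length : Int) ≤ i + 1) :
    pvStepA L i = L := by
  unfold pvStepA
  rw [if_neg (by omega)]

lemma pvFold_noop_list : ∀ (idx : List Int) (L : List Int),
    (∀ i ∈ idx, (L.length : Int) ≤ i + 1) → List.foldl pvStepA L idx = L := by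
  intro idx
  induction idx with
  | nil => intro L _; rfl
  | cons i rest ih =>
    intro L h
    simp only [List.foldl_cons]
    rw [pvStepA_noop L i (h i (List.mem_cons_self))]
    exact ih L (fun j hj => h j (List.mem_cons_of_mem _ hj))

lemma pvGet_tail (P : List Int) (x : Int) (t : List Int) :
    PySem.List.pyGet? (P ++ x :: t) ((P.length : Int) + 1) = t[0]? := by
  have h : ((P.length : Int) + 1) = (((P ++ [x]).length : Int)) := by simp
  rw [h, List.append_cons P x t]
  cases t with
  | nil => simp [PySem.List.pyGet?_eq_none_iff, PySem.Raise.InRange]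
  | cons y r => rw [PySem.List.pyGet?_append_length]; simp

lemma pvFold_inv : ∀ (S P : List Int) (m : Int),
    (P.length : Int) + S.length - 1 ≤ m →
    List.foldl pvStepA (P ++ S) (PySem.List.pyRange (P.length : Int) m 1) = P ++ pvKeep S := by
  intro S
  fun_induction pvKeep S with
  | case1 a rest ih =>
    intro P m hm
    simp only [List.length_cons] at hm
    push_cast at hm
    rw [PySem.List.pyRange_one_cons (by omega), List.foldl_cons]
    have hstep : pvStepA (P ++ a :: a :: rest) (P.length : Int) = P ++ a :: rest := by
      unfold pvStepA
      rw [if_pos (by simp only [List.length_append, List.length_cons]; push_cast; omega)]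
      rw [PySem.List.pyGet?_append_length, pvGet_tail, if_pos (by simp)]
      have hp := PySem.List.pop?_natCast (xs := P ++ a :: a :: rest) (n := P.length) (by simp)
      rw [hp]
      simp only [List.eraseIdx_append_of_length_le (Nat.le_refl P.length), Nat.sub_self,
        List.eraseIdx_zero, List.tail_cons]
    rw [hstep]
    have h2 : P ++ a :: rest = (P ++ [a]) ++ rest := by simp
    have h3 : (P.length : Int) + 1 = (((P ++ [a]).length : Int)) := by simp
    rw [h2, h3, ih (P ++ [a]) m (by simp; omega)]
    simp
  | case2 a b rest hab ih =>
    intro P m hm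
    simp only [List.length_cons] at hm
    push_cast at hm
    rw [PySem.List.pyRange_one_cons (by omega), List.foldl_cons]
    have hstep : pvStepA (P ++ a :: b :: rest) (P.length : Int) = P ++ a :: b :: rest := by
      unfold pvStepA
      rw [if_pos (by simp only [List.length_append, List.length_cons]; push_cast; omega)]
      rw [PySem.List.pyGet?_append_length, pvGet_tail, if_neg (by simp [hab])]
    rw [hstep]
    have h2 : P ++ a :: b :: rest = (P ++ [a]) ++ b :: rest := by simp
    have h3 : (P.length : Int) + 1 = (((P ++ [a]).length : Int)) := by simp
    rw [h2, h3, ih (P ++ [a]) m (by simp; omega)]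
    simp
  | case3 l h =>
    intro P m hm
    apply pvFold_noop_list
    intro i hi
    rw [PySem.List.mem_pyRange_one] at hi
    have hlen : (l.length : Int) ≤ 1 := by
      cases l with
      | nil => simp
      | cons a t => cases t with
        | nil => simp
        | cons b r => exact absurd rfl (h a b r)
    simp only [List.length_append]
    push_cast
    omega

lemma pvFloordiv_two (k : Nat) : PySem.Int.floordiv (k : Int) 2 = ((k / 2 : Nat) : Int) := by
  simp [PySem.Int.floordiv, Int.fdiv_eq_ediv]
lemma pvRun_lemma : ∀ (k : Nat) (v : Int) (t : List Int),
    (∀ w ∈ t.head?, w ≠ v) →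
    pvCountPops (List.replicate (k + 1) v ++ t) = (((k + 1) / 2 : Nat) : Int) + pvCountPops t := by
  intro k
  induction k using Nat.strong_induction_on with
  | _ k ih =>
    intro v t ht
    match k with
    | 0 =>
      cases t with
      | nil => simp [pvCountPops]
      | cons w t' =>
        have hw : w ≠ v := ht w rfl
        simp [pvCountPops, Ne.symm hw]
    | 1 => simp [pvCountPops]
    | (k' + 2) =>
      have h0 : List.replicate (k' + 2 + 1) v ++ t = v :: v :: (List.replicate (k' + 1) v ++ t) := by
        simp [List.replicate_succ]
      rw [h0]
      show (if v = v then 1 + pvCountPops (List.replicate (k' + 1) v ++ t) else _) = _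
      rw [if_pos rfl, ih k' (by omega) v t ht]
      have h1 : (k' + 2 + 1) / 2 = (k' + 1) / 2 + 1 := by omega
      rw [h1]
      push_cast
      ring
lemma pvFoldB_inv : ∀ (t : List Int) (pops prev : Int) (k : Nat),
    (let st := t.foldl pvStepB (pops, prev, ((k : Int) + 1));
     st.1 + PySem.Int.floordiv st.2.2 2)
    = pops + pvCountPops (List.replicate (k + 1) prev ++ t) := by
  intro t
  induction t with
  | nil =>
    intro pops prev k
    show pops + PySem.Int.floordiv ((k : Int) + 1) 2 = _
    have hcast : ((k : Int) + 1) = ((k + 1 : Nat) : Int) := by push_cast; ring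
    have h := pvRun_lemma k prev [] (by simp)
    rw [List.append_nil] at h
    rw [List.append_nil, hcast, pvFloordiv_two, h]
    simp [pvCountPops]
  | cons x t' ih =>
    intro pops prev k
    simp only [List.foldl_cons]
    by_cases hx : x = prev
    · have hstep : pvStepB (pops, prev, (k : Int) + 1) x = (pops, prev, ((k + 1 : Nat) : Int) + 1) := by
        unfold pvStepB; simp [hx]
      rw [hstep, ih pops prev (k + 1)]
      have hrep : List.replicate (k + 1 + 1) prev ++ t' = List.replicate (k + 1) prev ++ x :: t' := by
        subst hx
        rw [List.replicate_succ']
        simp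
      rw [hrep]
    · have hstep : pvStepB (pops, prev, (k : Int) + 1) x
          = (pops + PySem.Int.floordiv ((k + 1 : Nat) : Int) 2, x, ((0 : Nat) : Int) + 1) := by
        unfold pvStepB; simp [hx]
      rw [hstep, ih _ x 0, pvRun_lemma k prev (x :: t') (by simp [hx]), pvFloordiv_two]
      simp [List.replicate]
      ring

lemma pvAlt_eq (l : List Int) :
    delete_sort_array_alt l = (l.length : Int) - pvCountPops l := by
  cases l with
  | nil => simp [delete_sort_array_alt, pvCountPops]
  | cons h t =>
    show (((h :: t).length : Int) - _) = _
    have hinv := pvFoldB_inv t 0 h 0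
    simp only [Nat.cast_zero, zero_add] at hinv
    rw [hinv]
    simp

theorem pv_main (l : List Int) : delete_sort_array l = delete_sort_array_alt l := by
  rw [pvAlt_eq]
  cases l with
  | nil => decide
  | cons x t =>
    cases t with
    | nil => simp [delete_sort_array, pvCountPops]
    | cons y r =>
      unfold delete_sort_array
      rw [if_neg (by simp), if_neg (by simp)]
      have h1 : (PySem.List.enumerate (x :: y :: r) 0).foldl
            (fun L p => pvStepA L p.1) (x :: y :: r)
          = List.foldl pvStepA (x :: y :: r)
              ((PySem.List.enumerate (x :: y :: r) 0).map Prod.fst) := by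
        rw [List.foldl_map]
      have h2 := pvFold_inv (x :: y :: r) [] ((x :: y :: r).length : Int) (by simp)
      simp only [List.nil_append, List.length_nil, Nat.cast_zero] at h2
      rw [h1, PySem.List.map_fst_enumerate]
      simp only [zero_add] at h2 ⊢
      rw [h2, pvKeep_length]

-- ===== VERDICT (by name: the statement is the Claim_ definition above) =====
theorem delete_sort_array_spec : Claim_equal_delete_sort_array := by
  intro l _
  exact pv_main l
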